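-- pv_equiv track=rewrite | github.com/Twiggecode/Integer-Sequences | Zigzag Numbers/zigzag_numbers.py | check_if_alternating
-- ===== SOURCE A (Python) =====
-- def check_if_alternating(arr):
--     if len(arr) <= 1:
--         return True
--     for i in range(len(arr)-1):
--         if i % 2 == 0:
--             if arr[i+1] > arr[i]:
--                 continue
--             else:
--                 return False
--         else:
--             if arr[i+1] < arr[i]:
--                 continue
--             else:
--                 return False
--     return True
-- ===== SOURCE B (Python) =====
-- def _up(prev, xs):
--     if not xs:
--         return True
--     return prev < xs[0] and _down(xs[0], xs[1:])
--
--
-- def _down(prev, xs):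
--     if not xs:
--         return True
--     return prev > xs[0] and _up(xs[0], xs[1:])
--
--
-- def check_if_alternating(arr):
--     if not arr:
--         return True
--     return _up(arr[0], arr[1:])
-- ===== Notes on version B (the rewrite author's own statement) =====
-- stated objective: simpler
-- what changed: Replaced the index loop with parity arithmetic (i % 2) and element lookups arr[i], arr[i+1] by a pair of mutually recursive functions that walk the list structurally, alternating the comparison direction at each step; no indices, no length guard, no modulo.
import Mathlib
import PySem

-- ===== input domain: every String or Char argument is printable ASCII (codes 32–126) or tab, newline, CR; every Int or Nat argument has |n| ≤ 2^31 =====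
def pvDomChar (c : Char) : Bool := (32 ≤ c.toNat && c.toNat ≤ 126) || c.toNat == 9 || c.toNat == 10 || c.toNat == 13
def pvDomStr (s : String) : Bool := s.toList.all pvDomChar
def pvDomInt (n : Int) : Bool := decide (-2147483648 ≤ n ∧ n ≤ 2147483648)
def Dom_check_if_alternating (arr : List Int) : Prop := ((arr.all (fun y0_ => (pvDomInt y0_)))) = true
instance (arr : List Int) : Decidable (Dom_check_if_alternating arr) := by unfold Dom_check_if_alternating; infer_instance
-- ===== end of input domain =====

-- B replaces A's index loop with parity arithmetic by two mutually recursive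
-- functions walking the list structurally, alternating the comparison. Objective: simpler.


-- ===== PORT A =====
-- the for-loop over range(len(arr)-1) with its early returns, as structural recursion on the index list
def checkLoopA (arr : List Int) : List Int → Bool
  | [] => true
  | i :: is =>
    if PySem.Int.mod i 2 = 0 then
      if PySem.List.pyGetD arr (i + 1) 0 > PySem.List.pyGetD arr i 0 then checkLoopA arr is
      else false
    else
      if PySem.List.pyGetD arr (i + 1) 0 < PySem.List.pyGetD arr i 0 then checkLoopA arr is
      else false

def check_if_alternating (arr : List Int) : Bool :=
  if PySem.List.len arr ≤ 1 then true
  else checkLoopA arr (PySem.List.pyRange 0 (PySem.List.len arr - 1) 1)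

-- ===== PORT B =====
mutual
  def upB (prev : Int) : List Int → Bool
    | [] => true
    | x :: xs => prev < x && downB x xs
  def downB (prev : Int) : List Int → Bool
    | [] => true
    | x :: xs => prev > x && upB x xs
end

def check_if_alternating_alt (arr : List Int) : Bool :=
  match arr with
  | [] => true
  | x :: rest => upB x rest

-- ===== PRECONDITION & SPEC =====
def Spec_check_if_alternating (arr : List Int) (out : Bool) : Prop := out = check_if_alternating_alt arr
instance (arr : List Int) (out : Bool) : Decidable (Spec_check_if_alternating arr out) := by unfold Spec_check_if_alternating; infer_instance

-- ===== CLAIM (what is proved, stated in full; the proofs are below) =====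
def Claim_equal_check_if_alternating : Prop := ∀ (arr : List Int), Dom_check_if_alternating arr → Spec_check_if_alternating arr (check_if_alternating arr)

-- ===== LEMMAS AND PROOFS =====

theorem pyRange_empty_of_le {a b : Int} (h : b ≤ a) : PySem.List.pyRange a b 1 = [] := by
  simp [PySem.List.pyRange, show ¬ a < b by omega]

-- A's loop starting at index j equals B's recursion on the suffix, with direction given by j's parity
theorem loop_eq_rec (arr : List Int) (j : Nat) (hj : j < arr.length) :
    checkLoopA arr (PySem.List.pyRange (j : Int) ((arr.length : Int) - 1) 1) =
      (if j % 2 = 0 then upB (arr.getD j 0) (arr.drop (j + 1))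
       else downB (arr.getD j 0) (arr.drop (j + 1))) := by
  have hfuel : arr.length - j > 0 := by omega
  induction hn : arr.length - j generalizing j with
  | zero => omega
  | succ m ih =>
    by_cases hlast : j = arr.length - 1
    · -- last index: empty range, empty suffix
      have h1 : PySem.List.pyRange (j : Int) ((arr.length : Int) - 1) 1 = [] := by
        apply pyRange_empty_of_le; omega
      have h2 : arr.drop (j + 1) = [] := by
        apply List.drop_eq_nil_of_le; omega
      rw [h1, h2]
      split <;> simp [checkLoopA, upB, downB]
    · have hjlt : j + 1 < arr.length := by omega
      have hcons : PySem.List.pyRange (j : Int) ((arr.length : Int) - 1) 1 =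
          (j : Int) :: PySem.List.pyRange ((j : Int) + 1) ((arr.length : Int) - 1) 1 := by
        exact PySem.List.pyRange_one_cons (by omega)
      have hcast : ((j : Int) + 1) = ((j + 1 : Nat) : Int) := by push_cast; ring
      have hdrop : arr.drop (j + 1) = arr[j + 1] :: arr.drop (j + 2) := by
        rw [List.drop_eq_getElem_cons hjlt]
      have hgd1 : PySem.List.pyGetD arr ((j : Int) + 1) 0 = arr[j + 1] := by
        rw [hcast, PySem.List.pyGetD_natCast]
        exact List.getD_eq_getElem arr 0 hjlt
      have hgd0 : PySem.List.pyGetD arr (j : Int) 0 = arr.getD j 0 := by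
        rw [PySem.List.pyGetD_natCast]
      have hmod : PySem.Int.mod (j : Int) 2 = ((j % 2 : Nat) : Int) := by
        exact_mod_cast PySem.Int.mod_natCast j 2
      have hih := ih (j + 1) hjlt (by omega) (by omega)
      rw [hcons, checkLoopA, hmod, hgd1, hgd0, hcast, hih]
      have hgd0' : arr.getD j 0 = arr[j] := List.getD_eq_getElem arr 0 hj
      have hgd1' : arr.getD (j + 1) 0 = arr[j + 1] := List.getD_eq_getElem arr 0 hjlt
      rcases Nat.even_or_odd j with he | ho
      · have h2 : j % 2 = 0 := Nat.even_iff.mp he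
        have h3 : (j + 1) % 2 = 1 := by omega
        rw [hdrop]
        simp only [h2, h3, upB, hgd0', hgd1', Nat.cast_zero, Nat.cast_one]
        by_cases hc : arr[j] < arr[j + 1]
        · simp [hc]
        · simp [hc]
      · have h2 : j % 2 = 1 := Nat.odd_iff.mp ho
        have h3 : (j + 1) % 2 = 0 := by omega
        rw [hdrop]
        simp only [h2, h3, downB, hgd0', hgd1', Nat.cast_one]
        by_cases hc : arr[j + 1] < arr[j]
        · simp [hc]
        · simp [hc, show ¬ arr[j] > arr[j + 1] from hc]

-- ===== VERDICT (by name: the statement is the Claim_ definition above) =====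
theorem check_if_alternating_spec : Claim_equal_check_if_alternating := by
  intro arr _
  unfold Spec_check_if_alternating
  match arr with
  | [] => rfl
  | [x] => rfl
  | x :: y :: rest =>
    unfold check_if_alternating
    have hlen : ¬ PySem.List.len (x :: y :: rest) ≤ 1 := by
      simp [PySem.List.len_eq]
    rw [if_neg hlen, PySem.List.len_eq]
    have h0 : (x :: y :: rest).length > 0 := by simp
    have := loop_eq_rec (x :: y :: rest) 0 h0
    simp only [Nat.cast_zero] at this
    rw [this]
    simp [check_if_alternating_alt]
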